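-- pv_equiv track=rewrite | github.com/lmcassidy/macsima-parser | src/macsima_parser.py | propagate_magnification
-- ===== SOURCE A (Python) =====
-- def propagate_magnification(blocks):
--     last_mag = None
--     out = []
--     for block in blocks:
--         # If 'magnification' is present and not None/empty, update last_mag
--         if block.get("magnification"):
--             last_mag = block["magnification"]
--         new_block = block.copy()
--         new_block["magnification"] = last_mag
--         out.append(new_block)
--     return out
-- ===== SOURCE B (Python) =====
-- def propagate_magnification(blocks):
--     # Brute force: for each block, search backwards for the most recent
--     # truthy magnification instead of threading a carry through one loop.
--     def mag_at(i):
--         for j in range(i, -1, -1):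
--             v = blocks[j].get("magnification")
--             if v:
--                 return v
--         return None
--     return [{**b, "magnification": mag_at(i)} for i, b in enumerate(blocks)]
-- ===== Notes on version B (the rewrite author's own statement) =====
-- stated objective: alternative
-- what changed: Replaces the single stateful loop carrying last_mag with a per-index backward search: each output block's magnification is found by rescanning backwards for the most recent truthy value, and the output is built by a comprehension over enumerate.
import Mathlib
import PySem

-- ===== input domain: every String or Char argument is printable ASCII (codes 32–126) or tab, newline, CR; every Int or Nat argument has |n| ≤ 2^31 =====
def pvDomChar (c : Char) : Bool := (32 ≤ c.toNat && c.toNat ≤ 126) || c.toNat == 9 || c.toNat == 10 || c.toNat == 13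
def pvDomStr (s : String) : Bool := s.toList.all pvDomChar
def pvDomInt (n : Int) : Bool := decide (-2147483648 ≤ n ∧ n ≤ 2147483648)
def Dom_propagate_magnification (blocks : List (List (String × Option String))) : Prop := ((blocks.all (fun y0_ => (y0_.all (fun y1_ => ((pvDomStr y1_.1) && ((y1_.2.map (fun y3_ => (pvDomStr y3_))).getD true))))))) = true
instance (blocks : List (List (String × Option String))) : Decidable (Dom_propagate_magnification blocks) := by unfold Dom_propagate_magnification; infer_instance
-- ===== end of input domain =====

-- B replaces A's stateful forward-carry loop by a per-index backward search for the
-- most recent truthy magnification (alternative algorithm, not claimed faster).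

-- Python truthiness of an Optional[str] value: not None and not "".
def pmTruthy : Option String → Bool
  | none => false
  | some s => !(s == "")

-- block.get("magnification") (default None)
def pmGet (block : List (String × Option String)) : Option String :=
  PySem.Dict.getD (PySem.Dict.mk block) "magnification" none

-- ===== PORT A =====
def propagate_magnification (blocks : List (List (String × Option String))) : List (List (String × Option String)) :=
  (blocks.foldl
    (fun st block =>
      let g := pmGet block
      -- if block.get("magnification"): last_mag = block["magnification"]  (= g, key present when truthy)
      let last_mag := if pmTruthy g then g else st.1
      (last_mag, st.2 ++ [((PySem.Dict.mk block).insert "magnification" last_mag).items]))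
    ((none : Option String), ([] : List (List (String × Option String))))).2

-- ===== PORT B =====
-- mag_at i: scan j = i, i-1, …, 0 for the first truthy magnification.
-- blocks[j] is always in range at the call sites (0 ≤ j ≤ i < len blocks), so getD [] is exact.
def pmMagAt (blocks : List (List (String × Option String))) : Nat → Option String
  | 0 =>
      let v := pmGet (blocks.getD 0 [])
      if pmTruthy v then v else none
  | j + 1 =>
      let v := pmGet (blocks.getD (j + 1) [])
      if pmTruthy v then v else pmMagAt blocks j

def propagate_magnification_alt (blocks : List (List (String × Option String))) : List (List (String × Option String)) :=
  (PySem.List.enumerate blocks).map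
    (fun ib => ((PySem.Dict.mk ib.2).insert "magnification" (pmMagAt blocks ib.1.toNat)).items)

-- ===== PRECONDITION & SPEC =====
def Spec_propagate_magnification (blocks : List (List (String × Option String))) (out : List (List (String × Option String))) : Prop := out = propagate_magnification_alt blocks
instance (blocks : List (List (String × Option String))) (out : List (List (String × Option String))) : Decidable (Spec_propagate_magnification blocks out) := by unfold Spec_propagate_magnification; infer_instance

-- ===== CLAIM (what is proved, stated in full; the proofs are below) =====
def Claim_equal_propagate_magnification : Prop := ∀ (blocks : List (List (String × Option String))), Dom_propagate_magnification blocks → Spec_propagate_magnification blocks (propagate_magnification blocks)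

-- ===== LEMMAS AND PROOFS =====

-- the carry step of A's loop
def pmStep (l : Option String) (b : List (String × Option String)) : Option String :=
  let g := pmGet b
  if pmTruthy g then g else l

def pmOut (b : List (String × Option String)) (m : Option String) : List (String × Option String) :=
  ((PySem.Dict.mk b).insert "magnification" m).items

-- A's loop, restructured: output built from a carry
def pmBuild (l : Option String) : List (List (String × Option String)) → List (List (String × Option String))
  | [] => []
  | b :: bs => pmOut b (pmStep l b) :: pmBuild (pmStep l b) bs

lemma pmFoldA (bs : List (List (String × Option String))) :
    ∀ (l : Option String) (acc : List (List (String × Option String))),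
      (bs.foldl
        (fun st block =>
          let g := pmGet block
          let last_mag := if pmTruthy g then g else st.1
          (last_mag, st.2 ++ [((PySem.Dict.mk block).insert "magnification" last_mag).items]))
        (l, acc)).2 = acc ++ pmBuild l bs := by
  induction bs with
  | nil => intro l acc; simp [pmBuild]
  | cons b bs ih =>
      intro l acc
      simp only [List.foldl_cons, pmBuild]
      rw [ih]
      simp [pmStep, pmOut, pmGet]

lemma pmBuild_length (bs : List (List (String × Option String))) :
    ∀ l, (pmBuild l bs).length = bs.length := by
  induction bs with
  | nil => intro l; rfl
  | cons b bs ih => intro l; simp [pmBuild, ih]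

lemma pmBuild_getElem (bs : List (List (String × Option String))) :
    ∀ (l : Option String) (i : Nat) (h : i < bs.length),
      (pmBuild l bs)[i]'(by rw [pmBuild_length]; exact h)
        = pmOut (bs[i]'h) ((bs.take (i + 1)).foldl pmStep l) := by
  induction bs with
  | nil => intro l i h; exact absurd h (by simp)
  | cons b bs ih =>
      intro l i h
      cases i with
      | zero => simp [pmBuild]
      | succ i =>
          simp only [pmBuild, List.getElem_cons_succ, List.take_succ_cons, List.foldl_cons]
          exact ih (pmStep l b) i (by simpa using h)

lemma pmMagAt_eq_carry (bs : List (List (String × Option String))) :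
    ∀ (i : Nat), i < bs.length →
      pmMagAt bs i = (bs.take (i + 1)).foldl pmStep none := by
  intro i
  induction i with
  | zero =>
      intro h
      cases bs with
      | nil => simp at h
      | cons b bs => simp [pmMagAt, pmStep]
  | succ i ih =>
      intro h
      have hi : i < bs.length := Nat.lt_of_succ_lt h
      have htake : bs.take (i + 1 + 1) = bs.take (i + 1) ++ [bs[i + 1]'h] := by
        rw [List.take_add_one]
        simp [List.getElem?_eq_getElem h]
      rw [htake, List.foldl_append]
      simp only [List.foldl_cons, List.foldl_nil]
      have hget : bs.getD (i + 1) [] = bs[i + 1]'h := List.getD_eq_getElem bs [] h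
      simp only [pmMagAt, hget, pmStep]
      rw [ih hi]

-- ===== VERDICT (by name: the statement is the Claim_ definition above) =====
theorem propagate_magnification_spec : Claim_equal_propagate_magnification := by
  intro blocks _
  unfold Spec_propagate_magnification
  unfold propagate_magnification
  rw [pmFoldA blocks none []]
  simp only [List.nil_append]
  unfold propagate_magnification_alt
  apply List.ext_getElem
  · rw [pmBuild_length]
    simp [PySem.List.length_enumerate]
  · intro i h1 h2
    have hlen : i < blocks.length := by rwa [pmBuild_length] at h1
    rw [pmBuild_getElem blocks none i hlen]
    rw [List.getElem_map]
    rw [PySem.List.getElem_enumerate]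
    simp only [Int.toNat_natCast, Int.zero_add]
    rw [pmMagAt_eq_carry blocks i hlen]
    rfl
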